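-- pv_equiv track=rewrite | github.com/RubenGMeijer/SolvingProjectEuler | Project Euler 059 XOR decryption.py | solve
-- ===== SOURCE A (Python) =====
-- def solve(codes):
--
--     solution=''
--     misc=[32, 33, 39, 40, 41, 44, 45, 46, 63]
--
--     for x in range(3):
--         for y in range(97, 123):
--             for z in codes[x::3]:
--                 d = y ^ z
--                 if not (122 >= d >= 97 or 90 >= d >= 65 or 59 >= d >= 48 or d in misc):
--                     break
--             else:
--                 solution+=chr(y)
--                 break
--     return solution
-- ===== SOURCE B (Python) =====
-- def solve(codes):
--     VALID = (frozenset(range(97, 123)) | frozenset(range(65, 91))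
--              | frozenset(range(48, 60)) | {32, 33, 39, 40, 41, 44, 45, 46, 63})
--     out = []
--     for x in range(3):
--         cands = set(range(97, 123))
--         for z in codes[x::3]:
--             cands &= {y for y in range(97, 123) if (y ^ z) in VALID}
--         if cands:
--             out.append(chr(min(cands)))
--     return ''.join(out)
-- ===== Notes on version B (the rewrite author's own statement) =====
-- stated objective: alternative
-- what changed: Replaces A's find-first-key scan with inner break/for-else by set intersection: a precomputed frozenset of valid decrypted bytes, per-column intersection of surviving candidate keys, then min() of the survivors.
import Mathlib
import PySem

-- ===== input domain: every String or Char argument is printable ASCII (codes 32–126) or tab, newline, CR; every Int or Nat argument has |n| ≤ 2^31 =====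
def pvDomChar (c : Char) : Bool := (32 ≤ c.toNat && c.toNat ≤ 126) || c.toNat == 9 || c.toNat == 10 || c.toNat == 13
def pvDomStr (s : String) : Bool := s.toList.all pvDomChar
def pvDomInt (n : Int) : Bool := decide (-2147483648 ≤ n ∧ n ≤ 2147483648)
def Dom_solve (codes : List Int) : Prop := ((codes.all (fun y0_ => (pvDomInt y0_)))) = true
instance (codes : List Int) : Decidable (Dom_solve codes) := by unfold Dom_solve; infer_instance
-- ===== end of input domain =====

-- B replaces A's find-first-key scan (inner loop with break / for-else) by per-column
-- intersection of candidate-key sets against a precomputed set of valid decrypted bytes,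
-- then takes min() of the survivors; same cost, different decomposition.

-- ===== PORT A =====
def pvMisc : List Int := [32, 33, 39, 40, 41, 44, 45, 46, 63]

def pvOkA (d : Int) : Bool :=
  (122 ≥ d && d ≥ 97) || (90 ≥ d && d ≥ 65) || (59 ≥ d && d ≥ 48) || pvMisc.contains d

-- A's 'for y … for z …: break / else: append chr(y); break': first y whose whole column decrypts valid
def pvFindKeyA (col : List Int) : List Int → Option Int
  | [] => none
  | y :: ys =>
      if col.all (fun z => pvOkA (PySem.Int.bxor y z)) then some y else pvFindKeyA col ys

def solve (codes : List Int) : String :=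
  (PySem.List.pyRange 0 3 1).foldl (fun solution x =>
    let col := (PySem.List.slice? codes (some x) none 3).getD []   -- codes[x::3]; step 3 ≠ 0, never none
    match pvFindKeyA col (PySem.List.pyRange 97 123 1) with
    | some y => solution ++ String.ofList [Char.ofNat y.toNat]     -- solution += chr(y)
    | none => solution) ""

-- ===== PORT B =====
def pvValidB : PySem.Set Int :=
  PySem.Set.union (PySem.Set.union (PySem.Set.union
    (PySem.Set.ofList (PySem.List.pyRange 97 123 1))
    (PySem.List.pyRange 65 91 1))
    (PySem.List.pyRange 48 60 1))
    [(32 : Int), 33, 39, 40, 41, 44, 45, 46, 63]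

def pvColKeys (col : List Int) : PySem.Set Int :=
  col.foldl (fun cands z =>
    PySem.Set.inter cands (PySem.Set.ofList ((PySem.List.pyRange 97 123 1).filter
      (fun y => PySem.Set.contains pvValidB (PySem.Int.bxor y z)))))
    (PySem.Set.ofList (PySem.List.pyRange 97 123 1))

def solve_alt (codes : List Int) : String :=
  PySem.Str.join "" ((PySem.List.pyRange 0 3 1).foldl (fun out x =>
    let cands := pvColKeys ((PySem.List.slice? codes (some x) none 3).getD [])
    match PySem.List.min? cands (fun y => y) with
    | some m => out ++ [String.ofList [Char.ofNat m.toNat]]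
    | none => out) [])

-- ===== PRECONDITION & SPEC =====
def Spec_solve (codes : List Int) (out : String) : Prop := out = solve_alt codes
instance (codes : List Int) (out : String) : Decidable (Spec_solve codes out) := by unfold Spec_solve; infer_instance

-- ===== CLAIM (what is proved, stated in full; the proofs are below) =====
def Claim_equal_solve : Prop := ∀ (codes : List Int), Dom_solve codes → Spec_solve codes (solve codes)

-- ===== LEMMAS AND PROOFS =====

set_option maxRecDepth 8000 in
theorem pvValidB_contains (d : Int) : PySem.Set.contains pvValidB d = pvOkA d := by
  have hV : pvValidB = [97, 98, 99, 100, 101, 102, 103, 104, 105, 106, 107, 108, 109, 110,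
      111, 112, 113, 114, 115, 116, 117, 118, 119, 120, 121, 122,
      65, 66, 67, 68, 69, 70, 71, 72, 73, 74, 75, 76, 77, 78, 79, 80, 81, 82, 83, 84, 85,
      86, 87, 88, 89, 90,
      48, 49, 50, 51, 52, 53, 54, 55, 56, 57, 58, 59,
      32, 33, 39, 40, 41, 44, 45, 46, 63] := by decide
  rw [hV, Bool.eq_iff_iff]
  simp only [PySem.Set.contains, pvOkA, pvMisc, List.contains_eq_mem,
    Bool.or_eq_true, Bool.and_eq_true, decide_eq_true_eq,
    List.mem_cons, List.not_mem_nil, or_false]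
  omega

theorem pvColKeys_aux (col : List Int) (p : Int → Bool) :
    col.foldl (fun cands z =>
      PySem.Set.inter cands (PySem.Set.ofList ((PySem.List.pyRange 97 123 1).filter
        (fun y => PySem.Set.contains pvValidB (PySem.Int.bxor y z)))))
      ((PySem.List.pyRange 97 123 1).filter p)
    = (PySem.List.pyRange 97 123 1).filter
        (fun y => p y && col.all (fun z => PySem.Set.contains pvValidB (PySem.Int.bxor y z))) := by
  induction col generalizing p with
  | nil => simp
  | cons z zs ih =>
    simp only [List.foldl_cons]
    have hstep : PySem.Set.inter ((PySem.List.pyRange 97 123 1).filter p)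
        (PySem.Set.ofList ((PySem.List.pyRange 97 123 1).filter
          (fun y => PySem.Set.contains pvValidB (PySem.Int.bxor y z))))
        = (PySem.List.pyRange 97 123 1).filter
            (fun y => p y && PySem.Set.contains pvValidB (PySem.Int.bxor y z)) := by
      show List.filter _ _ = _
      rw [List.filter_filter]
      refine List.filter_congr ?_
      intro y hy
      have : (PySem.Set.contains (PySem.Set.ofList ((PySem.List.pyRange 97 123 1).filter
          (fun w => PySem.Set.contains pvValidB (PySem.Int.bxor w z)))) y)
          = PySem.Set.contains pvValidB (PySem.Int.bxor y z) := by
        rcases Bool.eq_false_or_eq_true (PySem.Set.contains pvValidB (PySem.Int.bxor y z)) with h | h <;>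
          rw [h] <;>
          simp only [PySem.Set.contains, List.contains_eq_mem, decide_eq_true_eq,
            decide_eq_false_iff_not, PySem.Set.mem_ofList, List.mem_filter] <;>
          simp_all
      rw [this, Bool.and_comm]
    rw [hstep, ih]
    refine List.filter_congr ?_
    intro y _
    simp only [List.all_cons]
    cases p y <;> cases PySem.Set.contains pvValidB (PySem.Int.bxor y z) <;> simp

theorem pvColKeys_eq (col : List Int) :
    pvColKeys col = (PySem.List.pyRange 97 123 1).filter
      (fun y => col.all (fun z => pvOkA (PySem.Int.bxor y z))) := by
  have h0 : PySem.Set.ofList (PySem.List.pyRange 97 123 1)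
      = (PySem.List.pyRange 97 123 1).filter (fun _ => true) := by decide
  unfold pvColKeys
  rw [h0, pvColKeys_aux]
  refine List.filter_congr ?_
  intro y _
  simp only [Bool.true_and]
  refine congrArg _ (funext fun z => ?_)
  rw [pvValidB_contains]

theorem pvFindKeyA_eq_find? (col : List Int) (ys : List Int) :
    pvFindKeyA col ys = ys.find? (fun y => col.all (fun z => pvOkA (PySem.Int.bxor y z))) := by
  induction ys with
  | nil => rfl
  | cons y t ih =>
    rw [pvFindKeyA, List.find?]
    split_ifs with h
    · rw [h]
    · rw [ih]
      simp [h]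

theorem min?_stays (key : Int → Int) (m : Int) (l : List Int) (h : ∀ y ∈ l, ¬ (key y < key m)) :
    PySem.List.min? (m :: l) key = some m := by
  induction l with
  | nil => rfl
  | cons y t ih =>
    have hy : ¬ (key y < key m) := h y (List.mem_cons_self)
    have step : PySem.List.min? (m :: y :: t) key = PySem.List.min? (m :: t) key := by
      unfold PySem.List.min?
      simp only [List.foldl_cons]
      rw [if_neg hy]
    rw [step]
    exact ih (fun z hz => h z (List.mem_cons_of_mem _ hz))

theorem min?_of_sorted (l : List Int) (h : l.Pairwise (· < ·)) :
    PySem.List.min? l (fun y => y) = l.head? := by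
  cases l with
  | nil => rfl
  | cons x t =>
    rw [List.head?_cons]
    exact min?_stays (fun y => y) x t (by
      intro y hy
      have := (List.pairwise_cons.mp h).1 y hy
      simp only []
      omega)

theorem piece_eq (col : List Int) :
    PySem.List.min? (pvColKeys col) (fun y => y)
      = pvFindKeyA col (PySem.List.pyRange 97 123 1) := by
  rw [pvColKeys_eq, pvFindKeyA_eq_find?,
    min?_of_sorted _ ((PySem.List.pairwise_lt_pyRange_one 97 123).filter _),
    List.head?_filter]

-- ===== VERDICT (by name: the statement is the Claim_ definition above) =====
set_option maxHeartbeats 1000000 in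
theorem solve_spec : Claim_equal_solve := by
  intro codes _
  show solve codes = solve_alt codes
  have h3 : PySem.List.pyRange 0 3 1 = [0, 1, 2] := by decide
  unfold solve solve_alt
  rw [h3]
  simp only [List.foldl_cons, List.foldl_nil, piece_eq]
  cases pvFindKeyA ((PySem.List.slice? codes (some 0) none 3).getD []) (PySem.List.pyRange 97 123 1) <;>
  cases pvFindKeyA ((PySem.List.slice? codes (some 1) none 3).getD []) (PySem.List.pyRange 97 123 1) <;>
  cases pvFindKeyA ((PySem.List.slice? codes (some 2) none 3).getD []) (PySem.List.pyRange 97 123 1) <;>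
    (apply String.toList_inj.mp
     simp [String.toList_append, PySem.Str.join, PySem.Chars.join, List.intercalate])
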